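-- pv_equiv track=rewrite | github.com/ElvisRodriguez/daily_coding_problems | python/unknown_alphabet.py | find_ordered_letters
-- ===== SOURCE A (Python) =====
-- import collections
--
-- def find_ordered_letters(words):
--     '''
--     Time Complexity: O(nmk)
--         - n is the size of the words array
--         - m is the average word size
--         - k is the size of the letters stack
--     Space Complexity: O(n)
--     '''
--     letters = collections.deque()
--     temporary_letters = collections.deque()
--     visited = set()
--     for i in range(len(words) - 1):
--         first_word = words[i]
--         second_word = words[i+1]
--         size = len(first_word) if len(first_word) < len(second_word) else len(second_word)
--         for j in range(size):
--             first_char = first_word[j]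
--             second_char = second_word[j]
--             if first_char != second_char:
--                 if first_char not in visited and second_char not in visited:
--                     letters.appendleft(second_char)
--                     letters.appendleft(first_char)
--                     visited.add(first_char)
--                     visited.add(second_char)
--                 elif first_char in visited and second_char not in visited:
--                     while letters[0] != first_char:
--                         temporary_letters.appendleft(letters.popleft())
--                     temporary_letters.appendleft(letters.popleft())
--                     letters.appendleft(second_char)
--                     while temporary_letters:
--                         letters.appendleft(temporary_letters.popleft())
--                     visited.add(second_char)
--                 elif first_char not in visited and second_char in visited:
--                     while letters[0] != second_char:
--                         temporary_letters.appendleft(letters.popleft())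
--                     letters.appendleft(first_char)
--                     while temporary_letters:
--                         letters.appendleft(temporary_letters.popleft())
--                     visited.add(first_char)
--                 break
--     return list(letters)
-- ===== SOURCE B (Python) =====
-- def find_ordered_letters(words):
--     '''Doubly-linked list over dicts char->neighbor: each insertion is O(1)
--     instead of rotating a deque to find the insertion point.'''
--     nxt = {}
--     prv = {}
--     head = None
--     for i in range(len(words) - 1):
--         for a, b in zip(words[i], words[i + 1]):
--             if a != b:
--                 if a not in nxt and b not in nxt:
--                     # push the pair a,b onto the front
--                     nxt[b] = head
--                     prv[b] = a
--                     if head is not None: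
--                         prv[head] = b
--                     nxt[a] = b
--                     prv[a] = None
--                     head = a
--                 elif a in nxt and b not in nxt:
--                     # splice b in right after a
--                     c = nxt[a]
--                     nxt[b] = c
--                     prv[b] = a
--                     nxt[a] = b
--                     if c is not None:
--                         prv[c] = b
--                 elif a not in nxt and b in nxt:
--                     # splice a in right before b
--                     p = prv[b]
--                     nxt[a] = b
--                     prv[a] = p
--                     prv[b] = a
--                     if p is None:
--                         head = a
--                     else:
--                         nxt[p] = a
--                 break
--     out = []
--     c = head
--     while c is not None:
--         out.append(c)
--         c = nxt[c]
--     return out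
-- ===== Notes on version B (the rewrite author's own statement) =====
-- stated objective: alternative
-- what changed: Replaces A's deque rotation (scanning/rotating the deque through a temporary deque to find each insertion point) with a doubly-linked list stored in two dicts (char->next, char->prev), so each insertion is O(1) in the number of letters already placed and the order is read off by one final walk.
import Mathlib
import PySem

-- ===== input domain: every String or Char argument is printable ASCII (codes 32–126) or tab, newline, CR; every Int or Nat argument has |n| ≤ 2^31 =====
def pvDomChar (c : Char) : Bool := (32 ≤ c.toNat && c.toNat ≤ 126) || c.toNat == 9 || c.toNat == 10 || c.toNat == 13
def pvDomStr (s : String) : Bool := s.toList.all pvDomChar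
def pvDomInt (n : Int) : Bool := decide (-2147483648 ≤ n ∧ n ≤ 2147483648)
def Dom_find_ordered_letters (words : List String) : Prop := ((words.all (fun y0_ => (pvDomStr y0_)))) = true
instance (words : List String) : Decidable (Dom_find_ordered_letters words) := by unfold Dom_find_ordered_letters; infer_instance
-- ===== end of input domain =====

-- B replaces A's deque rotation (scan to the insertion point) by a doubly-linked
-- list kept in two dicts, so each insertion is O(1); objective: alternative
-- (a timing run did not confirm a >=1.5x speed-up, so no speed is claimed).

-- ===== PORT A =====
-- 'while letters[0] != c: temp.appendleft(letters.popleft())' : pop until the head is c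
def pvPopTo (c : Char) : List Char → List Char → List Char × List Char
  | [], temp => ([], temp)
  | x :: xs, temp => if x = c then (x :: xs, temp) else pvPopTo c xs (x :: temp)

-- 'while temporary_letters: letters.appendleft(temporary_letters.popleft())'
def pvRestore : List Char → List Char → List Char
  | [], letters => letters
  | t :: ts, letters => pvRestore ts (t :: letters)

-- inner 'for j in range(size)' over the two words' characters (with break)
def pvPairA : List Char → List Char → List Char × PySem.Set Char → List Char × PySem.Set Char
  | a :: as_, b :: bs, (letters, visited) =>
    if a ≠ b then
      if ¬ a ∈ visited ∧ ¬ b ∈ visited then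
        (a :: b :: letters, (visited.add a).add b)
      else if a ∈ visited ∧ ¬ b ∈ visited then
        match pvPopTo a letters [] with
        | (x :: rest, temp) => (pvRestore (x :: temp) (b :: rest), visited.add b)
        | ([], temp) => ([], visited.add b)  -- unreachable: Python would raise IndexError on the empty deque
      else if ¬ a ∈ visited ∧ b ∈ visited then
        match pvPopTo b letters [] with
        | (l, temp) => (pvRestore temp (a :: l), visited.add a)
      else (letters, visited)
    else pvPairA as_ bs (letters, visited)
  | _, _, st => st

-- outer 'for i in range(len(words)-1)' over adjacent pairs
def pvLoopA : List String → List Char × PySem.Set Char → List Char × PySem.Set Char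
  | w1 :: w2 :: rest, st => pvLoopA (w2 :: rest) (pvPairA w1.toList w2.toList st)
  | _, st => st

def find_ordered_letters (words : List String) : List String :=
  ((pvLoopA words ([], PySem.Set.empty)).1).map (fun c => String.ofList [c])

-- ===== PORT B =====
-- state: (head, nxt, prv) — a doubly-linked list of chars in two dicts
def pvPairB : List Char → List Char →
    Option Char × PySem.Dict Char (Option Char) × PySem.Dict Char (Option Char) →
    Option Char × PySem.Dict Char (Option Char) × PySem.Dict Char (Option Char)
  | a :: as_, b :: bs, (head, nxt, prv) =>
    if a ≠ b then
      if ¬ nxt.contains a = true ∧ ¬ nxt.contains b = true then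
        -- push the pair a,b onto the front
        let nxt1 := (nxt.insert b head).insert a (some b)
        let prv1 := match head with
          | some h => ((prv.insert b (some a)).insert h (some b)).insert a none
          | none => (prv.insert b (some a)).insert a none
        (some a, nxt1, prv1)
      else if nxt.contains a = true ∧ ¬ nxt.contains b = true then
        -- splice b in right after a
        let c := (nxt.get? a).getD none   -- Python's nxt[a]; the key is present in this branch
        let nxt1 := (nxt.insert b c).insert a (some b)
        let prv1 := match c with
          | some d => (prv.insert b (some a)).insert d (some b)
          | none => prv.insert b (some a)
        (head, nxt1, prv1)
      else if ¬ nxt.contains a = true ∧ nxt.contains b = true then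
        -- splice a in right before b
        let p := (prv.get? b).getD none   -- Python's prv[b]; the key is present in this branch
        let nxt1 := nxt.insert a (some b)
        let prv1 := (prv.insert a p).insert b (some a)
        match p with
        | none => (some a, nxt1, prv1)
        | some q => (head, nxt1.insert q (some a), prv1)
      else (head, nxt, prv)
    else pvPairB as_ bs (head, nxt, prv)
  | _, _, st => st

def pvLoopB : List String →
    Option Char × PySem.Dict Char (Option Char) × PySem.Dict Char (Option Char) →
    Option Char × PySem.Dict Char (Option Char) × PySem.Dict Char (Option Char)
  | w1 :: w2 :: rest, st => pvLoopB (w2 :: rest) (pvPairB w1.toList w2.toList st)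
  | _, st => st

-- final 'while c is not None' walk; fuel = number of dict entries is a pure
-- totality guard (the chain visits each key at most once)
def pvTraverse (nxt : PySem.Dict Char (Option Char)) : Nat → Option Char → List Char
  | 0, _ => []
  | _ + 1, none => []
  | f + 1, some c => c :: pvTraverse nxt f ((nxt.get? c).getD none)

def find_ordered_letters_alt (words : List String) : List String :=
  let st := pvLoopB words (none, PySem.Dict.empty, PySem.Dict.empty)
  (pvTraverse st.2.1 st.2.1.size st.1).map (fun c => String.ofList [c])

-- ===== PRECONDITION & SPEC =====
def Spec_find_ordered_letters (words : List String) (out : List String) : Prop := out = find_ordered_letters_alt words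
instance (words : List String) (out : List String) : Decidable (Spec_find_ordered_letters words out) := by unfold Spec_find_ordered_letters; infer_instance

-- ===== CLAIM (what is proved, stated in full; the proofs are below) =====
def Claim_equal_find_ordered_letters : Prop := ∀ (words : List String), Dom_find_ordered_letters words → Spec_find_ordered_letters words (find_ordered_letters words)

-- ===== LEMMAS AND PROOFS =====

-- chain segment: following nxt from pointer h traverses exactly l and ends at pointer e
def ChainF (nxt : PySem.Dict Char (Option Char)) : Option Char → List Char → Option Char → Prop
  | h, [], e => h = e
  | h, c :: cs, e => h = some c ∧ ChainF nxt ((nxt.get? c).getD none) cs e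

-- backward pointers: each element of l points back to its predecessor (p before the first)
def PChain (prv : PySem.Dict Char (Option Char)) : Option Char → List Char → Prop
  | _, [] => True
  | p, c :: cs => (prv.get? c).getD none = p ∧ PChain prv (some c) cs

def lastPtr (p : Option Char) (xs : List Char) : Option Char := xs.getLast?.elim p some

def SimInv (letters : List Char) (visited : PySem.Set Char) (head : Option Char)
    (nxt prv : PySem.Dict Char (Option Char)) : Prop :=
  letters.Nodup ∧
  (∀ c, c ∈ visited ↔ c ∈ letters) ∧
  (∀ c, nxt.contains c = true ↔ c ∈ letters) ∧
  nxt.size = letters.length ∧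
  ChainF nxt head letters none ∧
  PChain prv none letters

theorem pvRestore_eq (t l : List Char) : pvRestore t l = t.reverse ++ l := by
  induction t generalizing l with
  | nil => simp [pvRestore]
  | cons x xs ih => simp [pvRestore, ih]

theorem pvPopTo_eq (a : Char) (pre suf acc : List Char) (h : a ∉ pre) :
    pvPopTo a (pre ++ a :: suf) acc = (a :: suf, pre.reverse ++ acc) := by
  induction pre generalizing acc with
  | nil => simp [pvPopTo]
  | cons x xs ih =>
    simp only [List.mem_cons, not_or] at h
    rw [List.cons_append, pvPopTo, if_neg (fun hh => h.1 hh.symm), ih _ h.2]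
    simp

theorem chainF_append {nxt : PySem.Dict Char (Option Char)} {h e : Option Char}
    {xs ys : List Char} :
    ChainF nxt h (xs ++ ys) e ↔ ∃ m, ChainF nxt h xs m ∧ ChainF nxt m ys e := by
  induction xs generalizing h with
  | nil => simp [ChainF]
  | cons x xs ih =>
    simp only [List.cons_append, ChainF, ih]
    constructor
    · rintro ⟨hx, m, h1, h2⟩; exact ⟨m, ⟨hx, h1⟩, h2⟩
    · rintro ⟨m, ⟨hx, h1⟩, h2⟩; exact ⟨hx, m, h1, h2⟩

theorem chainF_congr {nxt nxt' : PySem.Dict Char (Option Char)} {h e : Option Char}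
    {l : List Char} (hg : ∀ x ∈ l, nxt'.get? x = nxt.get? x) :
    ChainF nxt h l e → ChainF nxt' h l e := by
  induction l generalizing h with
  | nil => exact id
  | cons c cs ih =>
    rintro ⟨hc, hrest⟩
    refine ⟨hc, ?_⟩
    rw [hg c (by simp)]
    exact ih (fun x hx => hg x (by simp [hx])) hrest

theorem chainF_insert_not_mem {nxt : PySem.Dict Char (Option Char)} {h e : Option Char}
    {l : List Char} {k : Char} {v : Option Char} (hk : k ∉ l) :
    ChainF nxt h l e → ChainF (nxt.insert k v) h l e :=
  chainF_congr (fun x hx => PySem.Dict.get?_insert_of_ne _ _ (fun he => hk (he ▸ hx)))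

theorem pchain_congr {prv prv' : PySem.Dict Char (Option Char)} {p : Option Char}
    {l : List Char} (hg : ∀ x ∈ l, prv'.get? x = prv.get? x) :
    PChain prv p l → PChain prv' p l := by
  induction l generalizing p with
  | nil => exact id
  | cons c cs ih =>
    rintro ⟨hc, hrest⟩
    exact ⟨by rw [hg c (by simp)]; exact hc, ih (fun x hx => hg x (by simp [hx])) hrest⟩

theorem pchain_insert_not_mem {prv : PySem.Dict Char (Option Char)} {p : Option Char}
    {l : List Char} {k : Char} {v : Option Char} (hk : k ∉ l) :
    PChain prv p l → PChain (prv.insert k v) p l :=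
  pchain_congr (fun x hx => PySem.Dict.get?_insert_of_ne _ _ (fun he => hk (he ▸ hx)))

theorem pchain_append {prv : PySem.Dict Char (Option Char)} {p : Option Char}
    {xs ys : List Char} :
    PChain prv p (xs ++ ys) ↔ PChain prv p xs ∧ PChain prv (lastPtr p xs) ys := by
  induction xs generalizing p with
  | nil => simp [PChain, lastPtr]
  | cons x xs ih =>
    simp only [List.cons_append, PChain, ih, lastPtr]
    constructor
    · rintro ⟨hx, h1, h2⟩
      refine ⟨⟨hx, h1⟩, ?_⟩
      cases xs with
      | nil => simpa using h2
      | cons y ys => simpa [List.getLast?_cons_cons] using h2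
    · rintro ⟨⟨hx, h1⟩, h2⟩
      refine ⟨hx, h1, ?_⟩
      cases xs with
      | nil => simpa using h2
      | cons y ys => simpa [List.getLast?_cons_cons] using h2

theorem pvTraverse_of_chain {nxt : PySem.Dict Char (Option Char)} :
    ∀ (l : List Char) (h : Option Char) (fuel : Nat),
    ChainF nxt h l none → l.length ≤ fuel → pvTraverse nxt fuel h = l := by
  intro l
  induction l with
  | nil =>
    intro h fuel hc _
    cases hc
    cases fuel <;> rfl
  | cons c cs ih =>
    intro h fuel hc hf
    obtain ⟨rfl, hrest⟩ := hc
    cases fuel with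
    | zero => simp at hf
    | succ f => simpa [pvTraverse] using ih _ f hrest (by simpa using hf)


theorem contains_false_of_not_mem {letters : List Char} {nxt : PySem.Dict Char (Option Char)}
    (hk : ∀ c, nxt.contains c = true ↔ c ∈ letters) {x : Char} (hx : x ∉ letters) :
    nxt.contains x = false := by
  rcases Bool.eq_false_or_eq_true (nxt.contains x) with h | h
  · exact absurd ((hk x).1 h) hx
  · exact h

theorem case_new_none {a b : Char} {letters : List Char} {visited : PySem.Set Char}
    {nxt prv : PySem.Dict Char (Option Char)}
    (hinv : SimInv letters visited none nxt prv)
    (hab : a ≠ b) (ha : a ∉ letters) (hb : b ∉ letters) :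
    SimInv (a :: b :: letters) ((visited.add a).add b) (some a)
      ((nxt.insert b none).insert a (some b))
      ((prv.insert b (some a)).insert a none) := by
  obtain ⟨hnd, hv, hk, hs, hc, hp⟩ := hinv
  -- from ChainF nxt none letters none, letters = []
  have hlet : letters = [] := by
    cases letters with
    | nil => rfl
    | cons x xs => exact absurd hc.1 (by simp)
  subst hlet
  refine ⟨by simp [hab], ?_, ?_, ?_, ?_, ?_⟩
  · intro c; simp [PySem.Set.mem_add, hv c] <;> try tauto
  · intro c; simp [PySem.Dict.contains_insert, hk c] <;> try tauto
  · rw [PySem.Dict.size_insert, PySem.Dict.size_insert]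
    have h1 : nxt.contains b = false := contains_false_of_not_mem hk hb
    have h2 : ((nxt.insert b none).contains a) = false := by
      rw [PySem.Dict.contains_insert]
      simp [hab, contains_false_of_not_mem hk ha]
    simp [h1, h2, hs]
  · refine ⟨rfl, ?_⟩
    rw [PySem.Dict.get?_insert_self]
    refine ⟨rfl, ?_⟩
    rw [PySem.Dict.get?_insert_of_ne _ _ (Ne.symm hab), PySem.Dict.get?_insert_self]
    rfl
  · refine ⟨?_, ?_, trivial⟩
    · rw [PySem.Dict.get?_insert_self]; rfl
    · rw [PySem.Dict.get?_insert_of_ne _ _ (Ne.symm hab), PySem.Dict.get?_insert_self]; rfl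

theorem case_new_some {a b h : Char} {letters : List Char} {visited : PySem.Set Char}
    {nxt prv : PySem.Dict Char (Option Char)}
    (hinv : SimInv letters visited (some h) nxt prv)
    (hab : a ≠ b) (ha : a ∉ letters) (hb : b ∉ letters) :
    SimInv (a :: b :: letters) ((visited.add a).add b) (some a)
      ((nxt.insert b (some h)).insert a (some b))
      (((prv.insert b (some a)).insert h (some b)).insert a none) := by
  obtain ⟨hnd, hv, hk, hs, hc, hp⟩ := hinv
  refine ⟨by simp [List.nodup_cons, ha, hb, hab, hnd], ?_, ?_, ?_, ?_, ?_⟩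
  · intro c; simp [PySem.Set.mem_add, hv c] <;> try tauto
  · intro c; simp [PySem.Dict.contains_insert, hk c] <;> try tauto
  · rw [PySem.Dict.size_insert, PySem.Dict.size_insert]
    have h1 : nxt.contains b = false := contains_false_of_not_mem hk hb
    have h2 : ((nxt.insert b (some h)).contains a) = false := by
      rw [PySem.Dict.contains_insert]
      simp [hab, contains_false_of_not_mem hk ha]
    simp [h1, h2, hs]
  · refine ⟨rfl, ?_⟩
    rw [PySem.Dict.get?_insert_self]
    refine ⟨rfl, ?_⟩
    rw [PySem.Dict.get?_insert_of_ne _ _ (Ne.symm hab), PySem.Dict.get?_insert_self]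
    exact chainF_insert_not_mem ha (chainF_insert_not_mem hb hc)
  · cases letters with
    | nil => exact absurd hc (by simp [ChainF])
    | cons x xs =>
      obtain ⟨hx, hcrest⟩ := hc
      have hx' : h = x := by injection hx
      subst hx'
      have hah : a ≠ h := fun he => ha (he ▸ List.mem_cons_self)
      have hbh : b ≠ h := fun he => hb (he ▸ List.mem_cons_self)
      obtain ⟨hph, hprest⟩ := hp
      refine ⟨?_, ?_, ?_, ?_⟩
      · rw [PySem.Dict.get?_insert_self]; rfl
      · rw [PySem.Dict.get?_insert_of_ne _ _ (Ne.symm hab),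
          PySem.Dict.get?_insert_of_ne _ _ hbh, PySem.Dict.get?_insert_self]
        rfl
      · rw [PySem.Dict.get?_insert_of_ne _ _ (Ne.symm hah), PySem.Dict.get?_insert_self]
        rfl
      · have hhxs : h ∉ xs := by simp [List.nodup_cons] at hnd; exact hnd.1
        exact pchain_insert_not_mem (fun hm => ha (by simp [hm]))
          (pchain_insert_not_mem hhxs
            (pchain_insert_not_mem (fun hm => hb (by simp [hm])) hprest))

theorem perm_insert_mid (pre suf : List Char) (a b : Char) :
    List.Perm (pre ++ a :: b :: suf) (b :: (pre ++ a :: suf)) := by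
  have h1 : pre ++ a :: b :: suf = (pre ++ [a]) ++ b :: suf := by simp
  rw [h1]
  have h2 := List.perm_middle (l₁ := pre ++ [a]) (l₂ := suf) (a := b)
  simpa using h2

theorem case_after {a b : Char} {pre suf : List Char} {visited : PySem.Set Char}
    {head : Option Char} {nxt prv : PySem.Dict Char (Option Char)}
    (hinv : SimInv (pre ++ a :: suf) visited head nxt prv)
    (hab : a ≠ b) (hb : b ∉ pre ++ a :: suf) :
    SimInv (pre ++ a :: b :: suf) (visited.add b) head
      ((nxt.insert b ((nxt.get? a).getD none)).insert a (some b))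
      (match (nxt.get? a).getD none with
        | some d => (prv.insert b (some a)).insert d (some b)
        | none => prv.insert b (some a)) := by
  obtain ⟨hnd, hv, hk, hs, hc, hp⟩ := hinv
  have hbp : b ∉ pre := fun h => hb (by simp [h])
  have hbs : b ∉ suf := fun h => hb (by simp [h])
  have hba : b ≠ a := Ne.symm hab
  have hnd' := hnd
  simp only [List.nodup_append, List.nodup_cons, List.mem_cons] at hnd'
  obtain ⟨hndp, ⟨has, hnds⟩, hdisj⟩ := hnd'
  have hap : a ∉ pre := fun h => hdisj a h a (Or.inl rfl) rfl
  -- split the old chain at a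
  rw [chainF_append] at hc
  obtain ⟨m, hcpre, hcmid⟩ := hc
  obtain ⟨hm, hcsuf⟩ := hcmid
  subst hm
  -- membership of a
  have hamem : a ∈ pre ++ a :: suf := by simp
  refine ⟨?_, ?_, ?_, ?_, ?_, ?_⟩
  · exact ((perm_insert_mid pre suf a b).nodup_iff).2 (List.nodup_cons.2 ⟨hb, hnd⟩)
  · intro c
    simp only [PySem.Set.mem_add, hv c]
    simp
    try tauto
  · intro c
    simp only [PySem.Dict.contains_insert, Bool.or_eq_true, beq_iff_eq, hk c]
    simp
    try tauto
  · rw [PySem.Dict.size_insert, PySem.Dict.size_insert]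
    have h1 : nxt.contains b = false := contains_false_of_not_mem hk hb
    have h2 : ((nxt.insert b ((nxt.get? a).getD none)).contains a) = true := by
      rw [PySem.Dict.contains_insert]
      simp [(hk a).2 hamem]
    simp [h1, h2, hs]
    omega
  · rw [chainF_append]
    refine ⟨some a, ?_, ?_⟩
    · exact chainF_insert_not_mem hap (chainF_insert_not_mem hbp hcpre)
    · refine ⟨rfl, ?_⟩
      rw [PySem.Dict.get?_insert_self]
      refine ⟨rfl, ?_⟩
      rw [PySem.Dict.get?_insert_of_ne _ _ hba, PySem.Dict.get?_insert_self]
      exact chainF_insert_not_mem has (chainF_insert_not_mem hbs hcsuf)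
  · rw [pchain_append] at hp
    obtain ⟨hppre, hpa, hpsuf⟩ := And.intro hp.1 (And.intro hp.2.1 hp.2.2)
    rw [pchain_append]
    cases suf with
    | nil =>
      have hc0 : (nxt.get? a).getD none = none := hcsuf
      rw [hc0]
      refine ⟨pchain_insert_not_mem hbp hppre, ?_, ?_, trivial⟩
      · rw [PySem.Dict.get?_insert_of_ne _ _ hab]
        exact hpa
      · rw [PySem.Dict.get?_insert_self]
        rfl
    | cons d suf' =>
      have hc0 : (nxt.get? a).getD none = some d := hcsuf.1
      rw [hc0]
      have hda : d ≠ a := fun h => has (h ▸ List.mem_cons_self)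
      have hdb : d ≠ b := fun h => hbs (h ▸ List.mem_cons_self)
      have hdp : d ∉ pre := fun h => hdisj d h d (Or.inr List.mem_cons_self) rfl
      have hds' : d ∉ suf' := (List.nodup_cons.1 hnds).1
      obtain ⟨hpd, hptail⟩ := hpsuf
      refine ⟨?_, ?_, ?_, ?_, ?_⟩
      · exact pchain_insert_not_mem hdp (pchain_insert_not_mem hbp hppre)
      · rw [PySem.Dict.get?_insert_of_ne _ _ (Ne.symm hda),
          PySem.Dict.get?_insert_of_ne _ _ hab]
        exact hpa
      · rw [PySem.Dict.get?_insert_of_ne _ _ (Ne.symm hdb), PySem.Dict.get?_insert_self]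
        rfl
      · rw [PySem.Dict.get?_insert_self]
        rfl
      · have hbs' : b ∉ suf' := fun h => hbs (by simp [h])
        exact pchain_insert_not_mem hds' (pchain_insert_not_mem hbs' hptail)

theorem case_before_nil {a b : Char} {suf : List Char} {visited : PySem.Set Char}
    {head : Option Char} {nxt prv : PySem.Dict Char (Option Char)}
    (hinv : SimInv (b :: suf) visited head nxt prv)
    (hab : a ≠ b) (ha : a ∉ b :: suf) :
    SimInv (a :: b :: suf) (visited.add a) (some a)
      (nxt.insert a (some b)) ((prv.insert a none).insert b (some a)) := by
  obtain ⟨hnd, hv, hk, hs, hc, hp⟩ := hinv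
  have has : a ∉ suf := fun h => ha (by simp [h])
  have hbsuf : b ∉ suf := (List.nodup_cons.1 hnd).1
  obtain ⟨hh, hcsuf⟩ := hc
  obtain ⟨hpb, hpsuf⟩ := hp
  refine ⟨List.nodup_cons.2 ⟨ha, hnd⟩, ?_, ?_, ?_, ?_, ?_⟩
  · intro c
    simp only [PySem.Set.mem_add, hv c]
    simp
    try tauto
  · intro c
    simp only [PySem.Dict.contains_insert, Bool.or_eq_true, beq_iff_eq, hk c]
    simp
    try tauto
  · rw [PySem.Dict.size_insert]
    simp [contains_false_of_not_mem hk ha, hs]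
  · refine ⟨rfl, ?_⟩
    rw [PySem.Dict.get?_insert_self]
    refine ⟨rfl, ?_⟩
    rw [PySem.Dict.get?_insert_of_ne _ _ (Ne.symm hab)]
    exact chainF_insert_not_mem has hcsuf
  · refine ⟨?_, ?_, ?_⟩
    · rw [PySem.Dict.get?_insert_of_ne _ _ hab, PySem.Dict.get?_insert_self]
      rfl
    · rw [PySem.Dict.get?_insert_self]
      rfl
    · exact pchain_insert_not_mem hbsuf (pchain_insert_not_mem has hpsuf)

theorem case_before_concat {a b q : Char} {pre' suf : List Char} {visited : PySem.Set Char}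
    {head : Option Char} {nxt prv : PySem.Dict Char (Option Char)}
    (hinv : SimInv ((pre' ++ [q]) ++ b :: suf) visited head nxt prv)
    (hab : a ≠ b) (ha : a ∉ (pre' ++ [q]) ++ b :: suf) :
    SimInv ((pre' ++ [q]) ++ a :: b :: suf) (visited.add a) head
      ((nxt.insert a (some b)).insert q (some a))
      ((prv.insert a (some q)).insert b (some a)) := by
  obtain ⟨hnd, hv, hk, hs, hc, hp⟩ := hinv
  have hnd' := hnd
  simp only [List.nodup_append, List.nodup_cons, List.mem_cons, List.mem_append,
    List.mem_singleton] at hnd'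
  obtain ⟨⟨hndp', hqq, hdisj1⟩, ⟨hbs, hnds⟩, hdisj⟩ := hnd'
  have hap' : a ∉ pre' := fun h => ha (by simp [h])
  have haq : a ≠ q := fun h => ha (by simp [h])
  have hasuf : a ∉ suf := fun h => ha (by simp [h])
  have hqp' : q ∉ pre' := fun h => hdisj1 q h q (Or.inl rfl) rfl
  have hqb : q ≠ b := by
    intro h
    exact (hdisj q (by simp)) b (Or.inl rfl) h
  have hqsuf : q ∉ suf := by
    intro h
    exact (hdisj q (by simp)) q (Or.inr h) rfl
  have hbp' : b ∉ pre' := by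
    intro h
    exact (hdisj b (by simp [h])) b (Or.inl rfl) rfl
  have hqmem : q ∈ (pre' ++ [q]) ++ b :: suf := by simp
  -- split the old chain
  rw [chainF_append] at hc
  obtain ⟨m, hcpre, hcmid⟩ := hc
  rw [chainF_append] at hcpre
  obtain ⟨m', hcpre', hm', hcq2⟩ := hcpre
  subst hm'
  obtain ⟨hmb, hcsuf⟩ := hcmid
  subst hmb
  rw [pchain_append] at hp
  obtain ⟨hppre, hpb, hpsuf⟩ := And.intro hp.1 (And.intro hp.2.1 hp.2.2)
  refine ⟨?_, ?_, ?_, ?_, ?_, ?_⟩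
  · exact (List.perm_middle.nodup_iff).2 (List.nodup_cons.2 ⟨ha, hnd⟩)
  · intro c
    simp only [PySem.Set.mem_add, hv c]
    simp
    try tauto
  · intro c
    simp only [PySem.Dict.contains_insert, Bool.or_eq_true, beq_iff_eq, hk c]
    simp
    tauto
  · rw [PySem.Dict.size_insert, PySem.Dict.size_insert]
    have h1 : nxt.contains a = false := contains_false_of_not_mem hk ha
    have h2 : ((nxt.insert a (some b)).contains q) = true := by
      rw [PySem.Dict.contains_insert]
      simp [(hk q).2 hqmem]
    simp [h1, h2, hs]
    omega
  · rw [chainF_append]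
    refine ⟨some a, ?_, ?_⟩
    · rw [chainF_append]
      refine ⟨some q, ?_, ?_, ?_⟩
      · exact chainF_insert_not_mem hqp' (chainF_insert_not_mem hap' hcpre')
      · rfl
      · rw [PySem.Dict.get?_insert_self]
        rfl
    · refine ⟨rfl, ?_⟩
      rw [PySem.Dict.get?_insert_of_ne _ _ haq, PySem.Dict.get?_insert_self]
      refine ⟨rfl, ?_⟩
      rw [PySem.Dict.get?_insert_of_ne _ _ hqb.symm,
        PySem.Dict.get?_insert_of_ne _ _ (Ne.symm hab)]
      exact chainF_insert_not_mem hqsuf (chainF_insert_not_mem hasuf hcsuf)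
  · rw [pchain_append]
    refine ⟨?_, ?_, ?_, ?_⟩
    · refine pchain_congr (fun x hx => ?_) hppre
      have hxa : x ≠ a := fun h => ha (List.mem_append_left _ (h ▸ hx))
      have hxb : x ≠ b := by
        rcases List.mem_append.1 hx with h | h
        · exact fun he => hbp' (he ▸ h)
        · simp at h
          exact h ▸ hqb
      rw [PySem.Dict.get?_insert_of_ne _ _ hxb, PySem.Dict.get?_insert_of_ne _ _ hxa]
    · rw [PySem.Dict.get?_insert_of_ne _ _ hab, PySem.Dict.get?_insert_self]
      simp [lastPtr]
    · rw [PySem.Dict.get?_insert_self]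
      rfl
    · have hbsuf : b ∉ suf := hbs
      exact pchain_insert_not_mem hbsuf (pchain_insert_not_mem hasuf hpsuf)

theorem pvPairAB {w1 w2 : List Char} {letters : List Char} {visited : PySem.Set Char}
    {head : Option Char} {nxt prv : PySem.Dict Char (Option Char)}
    (hinv : SimInv letters visited head nxt prv) :
    SimInv (pvPairA w1 w2 (letters, visited)).1 (pvPairA w1 w2 (letters, visited)).2
      (pvPairB w1 w2 (head, nxt, prv)).1 (pvPairB w1 w2 (head, nxt, prv)).2.1
      (pvPairB w1 w2 (head, nxt, prv)).2.2 := by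
  induction w1 generalizing w2 with
  | nil => cases w2 <;> simpa [pvPairA, pvPairB] using hinv
  | cons a as_ ih =>
    cases w2 with
    | nil => simpa [pvPairA, pvPairB] using hinv
    | cons b bs =>
      by_cases hab : a = b
      · subst hab
        simpa [pvPairA, pvPairB] using ih (w2 := bs)
      · have hv := hinv.2.1
        have hk := hinv.2.2.1
        by_cases hA : a ∈ letters <;> by_cases hB : b ∈ letters
        · -- both already placed: nothing happens
          rw [show pvPairA (a :: as_) (b :: bs) (letters, visited) = (letters, visited) from by
            simp [pvPairA, hab, hv a, hv b, hA, hB]]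
          rw [show pvPairB (a :: as_) (b :: bs) (head, nxt, prv) = (head, nxt, prv) from by
            simp [pvPairB, hab, hk a, hk b, hA, hB]]
          exact hinv
        · -- a placed, b new: insert b right after a
          obtain ⟨pre, suf, rfl⟩ := List.append_of_mem hA
          have hap : a ∉ pre := by
            have hnd := hinv.1
            simp only [List.nodup_append, List.nodup_cons, List.mem_cons] at hnd
            exact fun h => hnd.2.2 a h a (Or.inl rfl) rfl
          rw [show pvPairA (a :: as_) (b :: bs) (pre ++ a :: suf, visited) =
              (pre ++ a :: b :: suf, visited.add b) from by
            simp [pvPairA, hab, hv a, hv b, hA, hB, pvPopTo_eq a pre suf [] hap, pvRestore_eq]]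
          rw [show pvPairB (a :: as_) (b :: bs) (head, nxt, prv) =
              (head, (nxt.insert b ((nxt.get? a).getD none)).insert a (some b),
                match (nxt.get? a).getD none with
                | some d => (prv.insert b (some a)).insert d (some b)
                | none => prv.insert b (some a)) from by
            simp [pvPairB, hab, hk a, hk b, hA, hB]]
          exact case_after hinv hab hB
        · -- b placed, a new: insert a right before b
          obtain ⟨pre, suf, rfl⟩ := List.append_of_mem hB
          have hbp : b ∉ pre := by
            have hnd := hinv.1
            simp only [List.nodup_append, List.nodup_cons, List.mem_cons] at hnd
            exact fun h => hnd.2.2 b h b (Or.inl rfl) rfl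
          rw [show pvPairA (a :: as_) (b :: bs) (pre ++ b :: suf, visited) =
              (pre ++ a :: b :: suf, visited.add a) from by
            simp [pvPairA, hab, hv a, hv b, hA, hB, pvPopTo_eq b pre suf [] hbp, pvRestore_eq]]
          have hp := hinv.2.2.2.2.2
          rw [pchain_append] at hp
          have hCA : nxt.contains a = false := contains_false_of_not_mem hk hA
          have hCB : nxt.contains b = true := (hk b).2 hB
          rcases List.eq_nil_or_concat pre with rfl | ⟨pre', q, hq⟩
          · have hpval : (prv.get? b).getD none = none := by
              simpa [lastPtr] using hp.2.1
            rw [show pvPairB (a :: as_) (b :: bs) (head, nxt, prv) =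
                (some a, nxt.insert a (some b), (prv.insert a none).insert b (some a)) from by
              simp [pvPairB, hab, hCA, hCB, hpval]]
            exact case_before_nil hinv hab hA
          · rw [List.concat_eq_append] at hq
            subst hq
            have hpval : (prv.get? b).getD none = some q := by
              simpa [lastPtr] using hp.2.1
            rw [show pvPairB (a :: as_) (b :: bs) (head, nxt, prv) =
                (head, (nxt.insert a (some b)).insert q (some a),
                  (prv.insert a (some q)).insert b (some a)) from by
              simp [pvPairB, hab, hCA, hCB, hpval]]
            exact case_before_concat hinv hab hA
        · -- both new: push the pair onto the front
          rw [show pvPairA (a :: as_) (b :: bs) (letters, visited) =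
              (a :: b :: letters, (visited.add a).add b) from by
            simp [pvPairA, hab, hv a, hv b, hA, hB]]
          cases head with
          | none =>
            rw [show pvPairB (a :: as_) (b :: bs) (none, nxt, prv) =
                (some a, (nxt.insert b none).insert a (some b),
                  (prv.insert b (some a)).insert a none) from by
              simp [pvPairB, hab, hk a, hk b, hA, hB]]
            exact case_new_none hinv hab hA hB
          | some h =>
            rw [show pvPairB (a :: as_) (b :: bs) (some h, nxt, prv) =
                (some a, (nxt.insert b (some h)).insert a (some b),
                  ((prv.insert b (some a)).insert h (some b)).insert a none) from by
              simp [pvPairB, hab, hk a, hk b, hA, hB]]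
            exact case_new_some hinv hab hA hB

theorem pvLoopAB {ws : List String} {letters : List Char} {visited : PySem.Set Char}
    {head : Option Char} {nxt prv : PySem.Dict Char (Option Char)}
    (hinv : SimInv letters visited head nxt prv) :
    SimInv (pvLoopA ws (letters, visited)).1 (pvLoopA ws (letters, visited)).2
      (pvLoopB ws (head, nxt, prv)).1 (pvLoopB ws (head, nxt, prv)).2.1
      (pvLoopB ws (head, nxt, prv)).2.2 := by
  induction ws generalizing letters visited head nxt prv with
  | nil => exact hinv
  | cons w1 rest ih =>
    cases rest with
    | nil => exact hinv
    | cons w2 rest' =>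
      have := pvPairAB (w1 := w1.toList) (w2 := w2.toList) hinv
      simpa [pvLoopA, pvLoopB] using ih this

-- ===== VERDICT (by name: the statement is the Claim_ definition above) =====
theorem find_ordered_letters_spec : Claim_equal_find_ordered_letters := by
  intro words _
  unfold Spec_find_ordered_letters find_ordered_letters find_ordered_letters_alt
  have h0 : SimInv [] PySem.Set.empty none PySem.Dict.empty PySem.Dict.empty := by
    refine ⟨List.nodup_nil, ?_, ?_, rfl, rfl, trivial⟩
    · intro c; simp [PySem.Set.empty]
    · intro c; simp [PySem.Dict.contains_empty]
  have h := pvLoopAB (ws := words) h0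
  obtain ⟨_, _, _, hsize, hchain, _⟩ := h
  congr 1
  exact (pvTraverse_of_chain _ _ _ hchain (le_of_eq hsize.symm)).symm
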